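-- pv_equiv track=rewrite | github.com/james5635/GeekForGeek-Data-Structure-and-Algorithm | array/subarray_with_given_sum/subarray_with_given_sum.py | subarray_with_sum_prefix_hash
-- ===== SOURCE A (Python) =====
-- def subarray_with_sum_prefix_hash(arr, target):
--     """
--     Alternative: Prefix Sum with Hash Map (works with negatives too).
--
--     Time Complexity: O(n)
--     Space Complexity: O(n)
--
--     Algorithm:
--     - Store prefix sums in hash map
--     - If prefix_sum - target exists in map, we found subarray
--     - This works for arrays with negative numbers too
--     """
--     prefix_sum = 0
--     prefix_map = {0: -1}  # prefix_sum 0 at index -1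
--
--     for i, num in enumerate(arr):
--         prefix_sum += num
--
--         if prefix_sum - target in prefix_map:
--             return prefix_map[prefix_sum - target] + 1, i
--
--         prefix_map[prefix_sum] = i
--
--     return -1, -1
-- ===== SOURCE B (Python) =====
-- def subarray_with_sum_prefix_hash(arr, target):
--     """
--     Nested O(n^2) scan, no extra memory.
--
--     For each end index (ascending), accumulate a running sum going leftward;
--     the first hit has the smallest end and, for that end, the largest start
--     (the shortest subarray ending there) -- the same answer the prefix-sum
--     hash-map version returns.
--     """
--     for end in range(len(arr)):
--         s = 0
--         for start in range(end, -1, -1):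
--             s += arr[start]
--             if s == target:
--                 return start, end
--     return -1, -1
-- ===== Notes on version B (the rewrite author's own statement) =====
-- stated objective: alternative
-- what changed: Replaced the one-pass prefix-sum hash map with a nested scan: for each end index ascending, accumulate a running sum leftward and return at the first hit, which reproduces the hash version's tie-break (smallest end, then largest start) with no auxiliary map.
import Mathlib
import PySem

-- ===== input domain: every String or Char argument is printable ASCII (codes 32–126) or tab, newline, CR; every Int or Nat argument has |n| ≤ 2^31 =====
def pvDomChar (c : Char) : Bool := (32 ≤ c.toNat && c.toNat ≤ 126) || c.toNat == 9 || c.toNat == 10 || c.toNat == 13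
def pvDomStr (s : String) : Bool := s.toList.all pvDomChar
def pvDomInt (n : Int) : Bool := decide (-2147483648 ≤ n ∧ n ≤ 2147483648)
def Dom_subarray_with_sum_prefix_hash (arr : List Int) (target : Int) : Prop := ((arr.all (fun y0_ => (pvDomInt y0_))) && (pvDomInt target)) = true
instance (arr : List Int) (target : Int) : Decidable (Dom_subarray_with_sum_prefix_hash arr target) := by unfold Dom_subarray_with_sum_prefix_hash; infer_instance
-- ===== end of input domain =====

-- B replaces A's prefix-sum hash map by a nested scan (same answer, no auxiliary map): an alternative algorithm, not a speed-up.

-- ===== PORT A =====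
-- the enumerate loop with early return: state = (remaining list, index i, prefix_sum, prefix_map)
def pvGoA (target : Int) : List Int → Int → Int → PySem.Dict Int Int → Int × Int
  | [], _, _, _ => (-1, -1)
  | num :: rest, i, ps, m =>
    let ps' := ps + num
    match m.get? (ps' - target) with
    | some v => (v + 1, i)
    | none => pvGoA target rest (i + 1) ps' (m.insert ps' i)

def subarray_with_sum_prefix_hash (arr : List Int) (target : Int) : Int × Int :=
  pvGoA target arr 0 0 (PySem.Dict.empty.insert 0 (-1))

-- ===== PORT B =====
-- inner loop: start runs from `st` down to 0, s accumulates arr[start]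
-- (arr.getD start 0 is exact for Python's arr[start]: B only indexes with 0 ≤ start < len(arr))
def pvInnerB (arr : List Int) (target : Int) : Int → Nat → Option Nat
  | s, 0 =>
    if s + arr.getD 0 0 = target then some 0 else none
  | s, st' + 1 =>
    if s + arr.getD (st' + 1) 0 = target then some (st' + 1)
    else pvInnerB arr target (s + arr.getD (st' + 1) 0) st'

-- outer loop: e is the current end index, rem the number of end indices still to try
def pvOuterB (arr : List Int) (target : Int) : Nat → Nat → Int × Int
  | _, 0 => (-1, -1)
  | e, rem + 1 =>
    match pvInnerB arr target 0 e with
    | some st => ((st : Int), (e : Int))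
    | none => pvOuterB arr target (e + 1) rem

def subarray_with_sum_prefix_hash_alt (arr : List Int) (target : Int) : Int × Int :=
  pvOuterB arr target 0 arr.length

-- ===== PRECONDITION & SPEC =====
def Spec_subarray_with_sum_prefix_hash (arr : List Int) (target : Int) (out : Int × Int) : Prop := out = subarray_with_sum_prefix_hash_alt arr target
instance (arr : List Int) (target : Int) (out : Int × Int) : Decidable (Spec_subarray_with_sum_prefix_hash arr target out) := by unfold Spec_subarray_with_sum_prefix_hash; infer_instance

-- ===== CLAIM (what is proved, stated in full; the proofs are below) =====
def Claim_equal_subarray_with_sum_prefix_hash : Prop := ∀ (arr : List Int) (target : Int), Dom_subarray_with_sum_prefix_hash arr target → Spec_subarray_with_sum_prefix_hash arr target (subarray_with_sum_prefix_hash arr target)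

-- ===== LEMMAS AND PROOFS =====

-- prefix sum of the first k elements
def pvP (arr : List Int) (k : Nat) : Int := (arr.take k).sum

lemma pvGetD (arr : List Int) (k : Nat) (hk : k < arr.length) :
    arr.getD k 0 = arr[k] := List.getD_eq_getElem arr 0 hk

lemma pvP_succ (arr : List Int) (k : Nat) (hk : k < arr.length) :
    pvP arr (k + 1) = pvP arr k + arr[k] := List.sum_take_succ arr k hk

-- the inner leftward scan finds the LARGEST k ≤ st with pvP arr k = pvP arr (e+1) - target,
-- provided s is the sum of arr[st+1..e]
lemma pvInnerB_char (arr : List Int) (target : Int) (e : Nat) (he : e < arr.length) :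
    ∀ st s, st ≤ e → s = pvP arr (e + 1) - pvP arr (st + 1) →
    pvInnerB arr target s st =
      ((List.range (st + 1)).reverse.find? (fun k => pvP arr k == pvP arr (e + 1) - target)) := by
  intro st
  induction st with
  | zero =>
    intro s _ hs
    have h1 := pvP_succ arr 0 (by omega)
    simp only [pvInnerB]
    rw [show (List.range (0 + 1)).reverse = [0] from rfl, pvGetD arr 0 (by omega)]
    by_cases hcond : s + arr[0] = target
    · have hp : pvP arr 0 = pvP arr (e + 1) - target := by omega
      rw [if_pos hcond, List.find?_cons_of_pos (by simp [hp])]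
    · have hp : ¬ pvP arr 0 = pvP arr (e + 1) - target := by omega
      rw [if_neg hcond, List.find?_cons_of_neg (by simp [hp]), List.find?_nil]
  | succ st' ih =>
    intro s hst hs
    have hlt : st' + 1 < arr.length := by omega
    have h1 := pvP_succ arr (st' + 1) hlt
    have hstep : s + arr[st' + 1] = pvP arr (e + 1) - pvP arr (st' + 1) := by omega
    simp only [pvInnerB]
    rw [show (List.range (st' + 1 + 1)).reverse = (st' + 1) :: (List.range (st' + 1)).reverse by
      simp [List.range_succ]]
    rw [pvGetD arr (st' + 1) hlt]
    by_cases hcond : s + arr[st' + 1] = target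
    · have hp : pvP arr (st' + 1) = pvP arr (e + 1) - target := by omega
      rw [if_pos hcond, List.find?_cons_of_pos (by simp [hp])]
    · have hp : ¬ pvP arr (st' + 1) = pvP arr (e + 1) - target := by omega
      rw [if_neg hcond, ih (s + arr[st' + 1]) (by omega) (by omega),
        List.find?_cons_of_neg (by simp [hp])]

-- main coupling: pvGoA with an invariant-carrying map equals pvOuterB
lemma pvGoA_eq_outer (arr : List Int) (target : Int) :
    ∀ rest i m, i + rest.length = arr.length → arr.drop i = rest →
      (∀ q : Int, m.get? q =
        (((List.range (i + 1)).reverse.find? (fun k => pvP arr k == q)).map (fun k => (k : Int) - 1))) →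
      pvGoA target rest (i : Int) (pvP arr i) m = pvOuterB arr target i rest.length := by
  intro rest
  induction rest with
  | nil => intro i m _ _ _; simp [pvGoA, pvOuterB]
  | cons num rest' ih =>
    intro i m hlen hdrop hm
    have hi : i < arr.length := by simp at hlen; omega
    have hnum : arr[i] = num := by
      have h0 : (arr.drop i)[0]? = some num := by rw [hdrop]; rfl
      rw [List.getElem?_drop, List.getElem?_eq_getElem (by omega : i + 0 < arr.length)] at h0
      simpa using h0
    have hps' : pvP arr i + num = pvP arr (i + 1) := by
      rw [pvP_succ arr i hi, hnum]
    simp only [pvGoA, List.length_cons, pvOuterB]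
    rw [hps', hm (pvP arr (i + 1) - target)]
    have hinner : pvInnerB arr target 0 i =
        ((List.range (i + 1)).reverse.find? (fun k => pvP arr k == pvP arr (i + 1) - target)) :=
      pvInnerB_char arr target i hi i 0 (le_refl i) (by omega)
    cases hfind : (List.range (i + 1)).reverse.find? (fun k => pvP arr k == pvP arr (i + 1) - target) with
    | some k =>
      rw [hinner, hfind]
      norm_num
    | none =>
      rw [hinner, hfind]
      have hdrop' : arr.drop (i + 1) = rest' := by
        have h := congrArg (List.drop 1) hdrop
        simpa [List.drop_drop, Nat.add_comm] using h
      have hm' : ∀ q : Int, (m.insert (pvP arr (i + 1)) (i : Int)).get? q =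
          (((List.range (i + 1 + 1)).reverse.find? (fun k => pvP arr k == q)).map (fun k => (k : Int) - 1)) := by
        intro q
        rw [PySem.Dict.get?_insert]
        rw [show (List.range (i + 1 + 1)).reverse = (i + 1) :: (List.range (i + 1)).reverse by
          simp [List.range_succ]]
        by_cases hq : q = pvP arr (i + 1)
        · have hp : pvP arr (i + 1) = q := hq.symm
          rw [if_pos hq, List.find?_cons_of_pos (by simp [hp])]
          simp
        · have hp : ¬ pvP arr (i + 1) = q := by omega
          rw [if_neg hq, hm q, List.find?_cons_of_neg (by simp [hp])]
      have h := ih (i + 1) (m.insert (pvP arr (i + 1)) (i : Int))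
        (by simp at hlen ⊢; omega) hdrop' hm'
      push_cast at h ⊢
      rw [h]
      simp

-- ===== VERDICT (by name: the statement is the Claim_ definition above) =====
theorem subarray_with_sum_prefix_hash_spec : Claim_equal_subarray_with_sum_prefix_hash := by
  intro arr target _
  unfold Spec_subarray_with_sum_prefix_hash subarray_with_sum_prefix_hash subarray_with_sum_prefix_hash_alt
  have h := pvGoA_eq_outer arr target arr 0 (PySem.Dict.empty.insert 0 (-1)) (by simp) (by simp) ?_
  · simpa [pvP] using h
  · intro q
    rw [PySem.Dict.get?_insert]
    by_cases hq : q = 0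
    · simp [hq, pvP]
    · simp [hq, pvP, Ne.symm hq, PySem.Dict.get?_empty]
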